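-- pv_equiv track=rewrite | github.com/a19130616-lab/crossword-master | backend/generator/solver.py | sanitize_grid
-- ===== SOURCE A (Python) =====
-- def run_length(grid, r, c, dr, dc):
--     rows = len(grid)
--     cols = len(grid[0]) if rows else 0
--     length = 0
--     rr, cc = r, c
--     while 0 <= rr < rows and 0 <= cc < cols and grid[rr][cc] != '#':
--         length += 1
--         rr += dr
--         cc += dc
--     return length
--
-- def cell_word_lengths(grid, r, c):
--     cc = c
--     while cc > 0 and grid[r][cc - 1] != '#':
--         cc -= 1
--     across = run_length(grid, r, cc, 0, 1)
--     rr = r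
--     while rr > 0 and grid[rr - 1][c] != '#':
--         rr -= 1
--     down = run_length(grid, rr, c, 1, 0)
--     return across, down
--
-- def sanitize_grid(grid):
--     changed = True
--     while changed:
--         changed = False
--         rows = len(grid)
--         cols = len(grid[0]) if rows else 0
--         for r in range(rows):
--             for c in range(cols):
--                 if grid[r][c] == '#':
--                     continue
--                 across, down = cell_word_lengths(grid, r, c)
--                 if across < 3 and down < 3:
--                     grid[r][c] = '#'
--                     changed = True
--     return grid
-- ===== SOURCE B (Python) =====
-- def row_lengths(cells):
--     # lengths[i] = length of the maximal run of non-'#' cells containing i (0 on '#')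
--     lengths = []
--     run = 0
--     for x in cells:
--         if x == '#':
--             lengths.extend([run] * run)
--             lengths.append(0)
--             run = 0
--         else:
--             run += 1
--     lengths.extend([run] * run)
--     return lengths
--
-- def sanitize_grid(grid):
--     rows = len(grid)
--     cols = len(grid[0]) if rows else 0
--     while True:
--         across = [row_lengths([grid[r][c] for c in range(cols)]) for r in range(rows)]
--         down = [row_lengths([grid[r][c] for r in range(rows)]) for c in range(cols)]
--         blank = [(r, c) for r in range(rows) for c in range(cols)
--                  if grid[r][c] != '#' and across[r][c] < 3 and down[c][r] < 3]
--         if not blank: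
--             return grid
--         for r, c in blank:
--             grid[r][c] = '#'
-- ===== Notes on version B (the rewrite author's own statement) =====
-- stated objective: faster
-- what changed: Replaces A's per-cell left/up walks plus run scans inside a sequential mutate-as-you-go sweep by batch fixpoint passes that compute all run lengths of every row and column in one linear sweep each (row_lengths) and then blank all qualifying cells at once; the order of blanking does not matter because the kept-cell fixpoint is unique.
import Mathlib
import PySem

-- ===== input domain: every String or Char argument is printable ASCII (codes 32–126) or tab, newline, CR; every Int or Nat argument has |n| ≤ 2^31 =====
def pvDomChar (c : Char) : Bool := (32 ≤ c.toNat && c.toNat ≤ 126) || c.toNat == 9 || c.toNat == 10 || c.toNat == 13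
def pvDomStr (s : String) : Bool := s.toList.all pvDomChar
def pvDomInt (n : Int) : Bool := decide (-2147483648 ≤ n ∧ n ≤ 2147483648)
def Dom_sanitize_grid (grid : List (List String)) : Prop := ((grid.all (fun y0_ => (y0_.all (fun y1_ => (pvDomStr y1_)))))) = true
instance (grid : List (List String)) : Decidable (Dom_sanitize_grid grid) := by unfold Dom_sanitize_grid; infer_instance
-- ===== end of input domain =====

-- B replaces A's per-cell left/up walk + run scan inside a sequential mutate-as-you-go sweep by
-- batch fixpoint passes computing every row/column run length in one linear sweep; measurably faster.
-- Both Pythons mutate `grid` in place identically (same final contents); the theorems are about the return value.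

-- ===== PORT A =====
-- grid[r][c]; the default "#" is never reached on Pre_ (indices in range there)
def pvCell (g : List (List String)) (r c : Nat) : String := (g.getD r []).getD c "#"

-- grid[r][c] = v  (both Pythons assign only at indices that are in range on Pre_)
def pvSet (g : List (List String)) (r c : Nat) (v : String) : List (List String) :=
  g.set r ((g.getD r []).set c v)

-- cols = len(grid[0]) if rows else 0
def colsOf (g : List (List String)) : Nat := (g.headD []).length

-- run_length, specialized to the only two direction vectors A calls it with: (0,1) …
def runRight (g : List (List String)) (rows cols r cc : Nat) : Nat :=
  if h : r < rows ∧ cc < cols ∧ pvCell g r cc ≠ "#" then runRight g rows cols r (cc + 1) + 1 else 0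
termination_by cols - cc
decreasing_by omega

-- … and (1,0)
def runDownA (g : List (List String)) (rows cols rr c : Nat) : Nat :=
  if h : rr < rows ∧ c < cols ∧ pvCell g rr c ≠ "#" then runDownA g rows cols (rr + 1) c + 1 else 0
termination_by rows - rr
decreasing_by omega

-- while cc > 0 and grid[r][cc-1] != '#': cc -= 1
def startLeft (g : List (List String)) (r : Nat) : Nat → Nat
  | 0 => 0
  | cc + 1 => if pvCell g r cc ≠ "#" then startLeft g r cc else cc + 1

-- while rr > 0 and grid[rr-1][c] != '#': rr -= 1
def startUp (g : List (List String)) (c : Nat) : Nat → Nat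
  | 0 => 0
  | rr + 1 => if pvCell g rr c ≠ "#" then startUp g c rr else rr + 1

def cellWordLengths (g : List (List String)) (rows cols r c : Nat) : Nat × Nat :=
  (runRight g rows cols r (startLeft g r c), runDownA g rows cols (startUp g c r) c)

-- one full for-r/for-c sweep of A's while-body, threading (grid, changed)
def passA (g0 : List (List String)) (rows cols : Nat) : List (List String) × Bool :=
  (List.range rows).foldl (fun st r =>
    (List.range cols).foldl (fun st c =>
      if pvCell st.1 r c = "#" then st
      else
        let ad := cellWordLengths st.1 rows cols r c
        if ad.1 < 3 ∧ ad.2 < 3 then (pvSet st.1 r c "#", true) else st) st) (g0, false)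

-- while changed: fuel rows*cols+1 always suffices (each changed pass blanks ≥ 1 cell); rows/cols
-- are recomputed each pass exactly as in A
def loopA : Nat → List (List String) → List (List String)
  | 0, g => g
  | fuel + 1, g =>
    let st := passA g g.length (colsOf g)
    if st.2 then loopA fuel st.1 else st.1

def sanitize_grid (grid : List (List String)) : List (List String) :=
  loopA (grid.length * colsOf grid + 1) grid

-- ===== PORT B =====
-- row_lengths: one sweep, emitting each maximal run's length for all of its cells
def rowLengthsAux (run : Nat) : List String → List Nat
  | [] => List.replicate run run
  | x :: xs => if x = "#" then List.replicate run run ++ 0 :: rowLengthsAux 0 xs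
               else rowLengthsAux (run + 1) xs

def rowLengths (cells : List String) : List Nat := rowLengthsAux 0 cells

-- [grid[r][c] for c in range(cols)]
def rowListB (g : List (List String)) (cols r : Nat) : List String :=
  (List.range cols).map (fun c => pvCell g r c)

-- [grid[r][c] for r in range(rows)]
def colListB (g : List (List String)) (rows c : Nat) : List String :=
  (List.range rows).map (fun r => pvCell g r c)

-- the `blank` list of one pass of B
def passB (g : List (List String)) (rows cols : Nat) : List (Nat × Nat) :=
  let across := (List.range rows).map (fun r => rowLengths (rowListB g cols r))
  let down := (List.range cols).map (fun c => rowLengths (colListB g rows c))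
  (List.range rows).flatMap (fun r =>
    ((List.range cols).filter (fun c =>
      decide (pvCell g r c ≠ "#" ∧ (across.getD r []).getD c 0 < 3 ∧ (down.getD c []).getD r 0 < 3))).map
      (fun c => (r, c)))

-- while True: … ; fuel rows*cols+1 always suffices (each non-empty blank pass blanks ≥ 1 cell)
def loopB : Nat → List (List String) → Nat → Nat → List (List String)
  | 0, g, _, _ => g
  | fuel + 1, g, rows, cols =>
    let blank := passB g rows cols
    if blank = [] then g
    else loopB fuel (blank.foldl (fun h rc => pvSet h rc.1 rc.2 "#") g) rows cols

def sanitize_grid_alt (grid : List (List String)) : List (List String) :=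
  loopB (grid.length * colsOf grid + 1) grid grid.length (colsOf grid)

-- ===== PRECONDITION & SPEC =====
-- Pre_ excludes exactly the ragged grids with a row shorter than the first row, on which both
-- Pythons raise IndexError on their very first sweep.
def Pre_sanitize_grid (grid : List (List String)) : Prop :=
  ∀ row ∈ grid, colsOf grid ≤ row.length
instance (grid : List (List String)) : Decidable (Pre_sanitize_grid grid) := by
  unfold Pre_sanitize_grid; infer_instance

def pvWitness_sanitize_grid : List (List String) :=
  [["c", "a", "t"], ["#", "b", "#"]]

def Spec_sanitize_grid (grid : List (List String)) (out : List (List String)) : Prop := out = sanitize_grid_alt grid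
instance (grid : List (List String)) (out : List (List String)) : Decidable (Spec_sanitize_grid grid out) := by unfold Spec_sanitize_grid; infer_instance

-- ===== CLAIM (what is proved, stated in full; the proofs are below) =====
def Claim_equal_sanitize_grid : Prop := ∀ (grid : List (List String)), Dom_sanitize_grid grid → Pre_sanitize_grid grid → Spec_sanitize_grid grid (sanitize_grid grid)

-- ===== LEMMAS AND PROOFS =====

-- masks: which cells are currently letters, per row / per column
def mRow (g : List (List String)) (r : Nat) : Nat → Bool := fun i => decide (pvCell g r i ≠ "#")
def mCol (g : List (List String)) (c : Nat) : Nat → Bool := fun i => decide (pvCell g i c ≠ "#")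

-- canonical word start / run length over a mask
def startLm (m : Nat → Bool) : Nat → Nat
  | 0 => 0
  | c + 1 => if m c then startLm m c else c + 1

def runm (m : Nat → Bool) (n s : Nat) : Nat :=
  if h : s < n ∧ m s then runm m n (s + 1) + 1 else 0
termination_by n - s
decreasing_by omega

def wl (m : Nat → Bool) (n c : Nat) : Nat := runm m n (startLm m c)

def blankable (g : List (List String)) (rows cols r c : Nat) : Prop :=
  r < rows ∧ c < cols ∧ pvCell g r c ≠ "#" ∧
    wl (mRow g r) cols c < 3 ∧ wl (mCol g c) rows r < 3

def Refines (g h : List (List String)) : Prop :=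
  g.length = h.length ∧ (∀ r, (g.getD r []).length = (h.getD r []).length) ∧
  (∀ r c, pvCell h r c = pvCell g r c ∨ pvCell h r c = "#")

def Fixp (rows cols : Nat) (f : List (List String)) : Prop := ∀ r c, ¬ blankable f rows cols r c

def pairs (rows cols : Nat) : List (Nat × Nat) :=
  (List.range rows).flatMap (fun r => (List.range cols).map (fun c => (r, c)))

def nh (g : List (List String)) (rows cols : Nat) : Nat :=
  (pairs rows cols).countP (fun rc => mRow g rc.1 rc.2)

-- ---------- basic mask lemmas ----------
theorem startLm_le (m : Nat → Bool) : ∀ c, startLm m c ≤ c := by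
  intro c; induction c with
  | zero => simp [startLm]
  | succ c ih =>
    simp only [startLm]
    by_cases h : m c = true
    · rw [if_pos h]; omega
    · rw [if_neg h]

theorem startLm_allTrue (m : Nat → Bool) : ∀ c, (∀ i, i < c → m i = true) → startLm m c = 0 := by
  intro c; induction c with
  | zero => simp [startLm]
  | succ c ih => intro h; simp only [startLm, h c (by omega)]; simpa using ih (fun i hi => h i (by omega))

theorem startLm_mem (m : Nat → Bool) : ∀ c i, startLm m c ≤ i → i < c → m i = true := by
  intro c; induction c with
  | zero => omega
  | succ c ih =>
    intro i h1 h2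
    by_cases hm : m c = true
    · simp only [startLm, hm, if_true] at h1
      rcases Nat.lt_or_ge i c with h | h
      · exact ih i h1 h
      · have : i = c := by omega
        subst this; exact hm
    · have hs : startLm m (c + 1) = c + 1 := by
        simp only [startLm]; rw [if_neg hm]
      omega

theorem startLm_left (m : Nat → Bool) : ∀ c, startLm m c = 0 ∨ m (startLm m c - 1) = false := by
  intro c; induction c with
  | zero => left; rfl
  | succ c ih =>
    by_cases hm : m c = true
    · simpa [startLm, hm] using ih
    · right; simp only [startLm, hm]
      simpa using eq_false_of_ne_true hm

theorem runm_mem (m : Nat → Bool) (n : Nat) : ∀ s i, s ≤ i → i < s + runm m n s → m i = true := by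
  intro s
  fun_induction runm m n s with
  | case1 s h ih =>
    intro i h1 h2
    rcases Nat.eq_or_lt_of_le h1 with h3 | h3
    · subst h3; exact h.2
    · exact ih i h3 (by omega)
  | case2 s h => intro i h1 h2; omega

theorem runm_le (m : Nat → Bool) (n : Nat) : ∀ s, s ≤ n → s + runm m n s ≤ n := by
  intro s
  fun_induction runm m n s with
  | case1 s h ih => intro _; have := ih (by omega); omega
  | case2 s h => intro h1; omega

theorem runm_stop (m : Nat → Bool) (n : Nat) :
    ∀ s, s ≤ n → (s + runm m n s = n ∨ m (s + runm m n s) = false) := by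
  intro s
  fun_induction runm m n s with
  | case1 s h ih =>
    intro _
    rcases ih (by omega) with h1 | h1
    · left; omega
    · right; have : s + (runm m n (s+1) + 1) = s + 1 + runm m n (s+1) := by omega
      rw [this]; exact h1
  | case2 s h =>
    intro h1
    rcases Nat.eq_or_lt_of_le h1 with h2 | h2
    · left; omega
    · right; simpa using fun hm => h ⟨h2, hm⟩

theorem runm_past (m : Nat → Bool) (n c : Nat) :
    ∀ s, s ≤ c → c < n → (∀ i, s ≤ i → i ≤ c → m i = true) → c < s + runm m n s := by
  intro s
  fun_induction runm m n s with
  | case1 s h ih =>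
    intro h1 h2 h3
    rcases Nat.eq_or_lt_of_le h1 with h4 | h4
    · omega
    · have := ih (by omega) h2 (fun i hi1 hi2 => h3 i (by omega) hi2); omega
  | case2 s h =>
    intro h1 h2 h3
    exact absurd ⟨by omega, h3 s le_rfl h1⟩ h

theorem runm_eqk (m : Nat → Bool) (n : Nat) :
    ∀ k s, (∀ i, s ≤ i → i < s + k → m i = true) → (m (s + k) = false ∨ s + k = n) →
      s + k ≤ n → runm m n s = k := by
  intro k; induction k with
  | zero =>
    intro s h1 h2 h3
    rw [runm, dif_neg]
    rintro ⟨hlt, hm⟩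
    rcases h2 with h2 | h2
    · rw [Nat.add_zero] at h2; rw [h2] at hm; cases hm
    · omega
  | succ k ih =>
    intro s h1 h2 h3
    have h2' : m (s + 1 + k) = false ∨ s + 1 + k = n := by
      have he : s + 1 + k = s + (k + 1) := by omega
      rw [he]; exact h2
    rw [runm, dif_pos ⟨by omega, h1 s le_rfl (by omega)⟩,
      ih (s + 1) (fun i hi1 hi2 => h1 i (by omega) (by omega)) h2' (by omega)]

theorem runm_congr (m1 m2 : Nat → Bool) (n : Nat) (hc : ∀ i, i < n → m1 i = m2 i) :
    ∀ s, runm m1 n s = runm m2 n s := by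
  intro s
  fun_induction runm m1 n s with
  | case1 s h ih =>
    have h2 : s < n ∧ m2 s = true := ⟨h.1, by rw [← hc s h.1]; exact h.2⟩
    conv_rhs => rw [runm]
    rw [dif_pos h2, ih]
  | case2 s h =>
    have h2 : ¬ (s < n ∧ m2 s = true) := by
      rintro ⟨hlt, hm⟩; exact h ⟨hlt, by rw [hc s hlt]; exact hm⟩
    conv_rhs => rw [runm]
    rw [dif_neg h2]

theorem startLm_congr (m1 m2 : Nat → Bool) : ∀ c, (∀ i, i < c → m1 i = m2 i) →
    startLm m1 c = startLm m2 c := by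
  intro c; induction c with
  | zero => intro _; rfl
  | succ c ih =>
    intro h
    simp only [startLm, h c (by omega)]
    split
    · exact ih (fun i hi => h i (by omega))
    · rfl

theorem wl_congr (m1 m2 : Nat → Bool) (n c : Nat) (hcn : c < n)
    (hc : ∀ i, i < n → m1 i = m2 i) : wl m1 n c = wl m2 n c := by
  unfold wl
  rw [startLm_congr m1 m2 c (fun i hi => hc i (by omega)), runm_congr m1 m2 n hc]

-- the monotonicity core: shrinking the mask can only shrink word lengths
theorem wl_mono (m1 m2 : Nat → Bool) (n c : Nat) (himp : ∀ i, m2 i = true → m1 i = true)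
    (hc2 : m2 c = true) (hcn : c < n) : wl m2 n c ≤ wl m1 n c := by
  have hmem2 : ∀ i, startLm m2 c ≤ i → i ≤ c → m2 i = true := by
    intro i hi1 hi2
    rcases Nat.eq_or_lt_of_le hi2 with h | h
    · subst h; exact hc2
    · exact startLm_mem m2 c i hi1 h
  have hmem1 : ∀ i, startLm m1 c ≤ i → i ≤ c → m1 i = true := by
    intro i hi1 hi2
    rcases Nat.eq_or_lt_of_le hi2 with h | h
    · rw [h]; exact himp c hc2
    · exact startLm_mem m1 c i hi1 h
  have ha2c : startLm m2 c ≤ c := startLm_le m2 c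
  have ha1c : startLm m1 c ≤ c := startLm_le m1 c
  have hb2 : c < startLm m2 c + runm m2 n (startLm m2 c) := runm_past m2 n c _ ha2c hcn hmem2
  have hb1 : c < startLm m1 c + runm m1 n (startLm m1 c) := runm_past m1 n c _ ha1c hcn hmem1
  have hle2 : startLm m2 c + runm m2 n (startLm m2 c) ≤ n := runm_le m2 n _ (by omega)
  have hle1 : startLm m1 c + runm m1 n (startLm m1 c) ≤ n := runm_le m1 n _ (by omega)
  have haa : startLm m1 c ≤ startLm m2 c := by
    by_contra hlt'
    have hlt : startLm m2 c < startLm m1 c := by omega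
    rcases startLm_left m1 c with h0 | h0
    · omega
    · have hm2 : m2 (startLm m1 c - 1) = true :=
        runm_mem m2 n (startLm m2 c) (startLm m1 c - 1) (by omega) (by omega)
      have := himp (startLm m1 c - 1) hm2
      rw [h0] at this; cases this
  have hbb : startLm m2 c + runm m2 n (startLm m2 c) ≤
      startLm m1 c + runm m1 n (startLm m1 c) := by
    by_contra hlt'
    have hlt : startLm m1 c + runm m1 n (startLm m1 c) <
        startLm m2 c + runm m2 n (startLm m2 c) := by omega
    rcases runm_stop m1 n (startLm m1 c) (by omega) with h0 | h0
    · omega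
    · have hm2 : m2 (startLm m1 c + runm m1 n (startLm m1 c)) = true :=
        runm_mem m2 n (startLm m2 c) _ (by omega) (by omega)
      have := himp _ hm2
      rw [h0] at this; cases this
  unfold wl
  omega

-- ---------- pvCell / pvSet ----------
theorem getD_set {α : Type} (l : List α) (i : Nat) (w : α) (j : Nat) (d : α) :
    (l.set i w).getD j d = if i = j ∧ i < l.length then w else l.getD j d := by
  rw [List.getD_eq_getElem?_getD, List.getD_eq_getElem?_getD, List.getElem?_set]
  by_cases h1 : i = j
  · subst h1
    by_cases h2 : i < l.length
    · rw [if_pos rfl, if_pos h2, if_pos ⟨rfl, h2⟩]; rfl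
    · rw [if_pos rfl, if_neg h2, if_neg (fun hh => h2 hh.2),
        List.getElem?_eq_none (by omega)]
  · rw [if_neg h1, if_neg (fun hh => h1 hh.1)]

theorem getD_lt {α : Type} (l : List α) (d : α) (i : Nat) (h : i < l.length) :
    l.getD i d = l[i] := List.getD_eq_getElem l d h

theorem pvCell_pvSet (g : List (List String)) (r c : Nat) (v : String) (r' c' : Nat) :
    pvCell (pvSet g r c v) r' c' =
      if r' = r ∧ c' = c ∧ r < g.length ∧ c < (g.getD r []).length then v else pvCell g r' c' := by
  unfold pvCell pvSet
  rw [getD_set]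
  by_cases h1 : r = r' ∧ r < g.length
  · rw [if_pos h1]
    obtain ⟨h1a, h1b⟩ := h1
    subst h1a
    rw [getD_set]
    by_cases h2 : c = c' ∧ c < (g.getD r []).length
    · rw [if_pos h2, if_pos ⟨rfl, h2.1.symm, h1b, h2.2⟩]
    · rw [if_neg h2, if_neg (fun hh => h2 ⟨hh.2.1.symm, hh.2.2.2⟩)]
  · rw [if_neg h1, if_neg (fun hh => h1 ⟨hh.1.symm, hh.2.2.1⟩)]

theorem pvSet_len (g : List (List String)) (r c : Nat) (v : String) :
    (pvSet g r c v).length = g.length := by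
  simp [pvSet]

theorem pvSet_rowlen (g : List (List String)) (r c : Nat) (v : String) (r' : Nat) :
    ((pvSet g r c v).getD r' []).length = (g.getD r' []).length := by
  unfold pvSet
  rw [getD_set]
  split
  · rename_i h
    rw [List.length_set, h.1]
  · rfl

theorem cell_ne_lt (g : List (List String)) (r c : Nat) (h : pvCell g r c ≠ "#") :
    r < g.length ∧ c < (g.getD r []).length := by
  constructor
  · by_contra hr
    have h1 : g.getD r [] = [] := List.getD_eq_default _ _ (by omega)
    refine h ?_
    unfold pvCell
    rw [h1]
    rfl
  · by_contra hc
    have h1 : (g.getD r []).getD c "#" = "#" := List.getD_eq_default _ _ (by omega)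
    exact h (by simpa [pvCell] using h1)

-- ---------- Refines ----------
theorem refines_refl (g : List (List String)) : Refines g g :=
  ⟨rfl, fun _ => rfl, fun _ _ => Or.inl rfl⟩

theorem refines_trans (g h k : List (List String)) (h1 : Refines g h) (h2 : Refines h k) :
    Refines g k := by
  obtain ⟨a1, b1, c1⟩ := h1; obtain ⟨a2, b2, c2⟩ := h2
  refine ⟨a1.trans a2, fun r => (b1 r).trans (b2 r), fun r c => ?_⟩
  rcases c2 r c with h | h
  · rw [h]; exact c1 r c
  · right; exact h

theorem refines_set (h : List (List String)) (r c : Nat) : Refines h (pvSet h r c "#") := by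
  refine ⟨(pvSet_len h r c "#").symm, fun r' => (pvSet_rowlen h r c "#" r').symm, fun r' c' => ?_⟩
  rw [pvCell_pvSet]
  split
  · right; rfl
  · left; rfl

theorem refines_set_to (h f : List (List String)) (r c : Nat) (h1 : Refines h f)
    (h2 : pvCell f r c = "#") : Refines (pvSet h r c "#") f := by
  obtain ⟨a1, b1, c1⟩ := h1
  refine ⟨by rw [← a1, pvSet_len], fun r' => by rw [← b1 r', pvSet_rowlen], fun r' c' => ?_⟩
  rw [pvCell_pvSet]
  split
  · rename_i hif
    right; rw [← hif.1, ← hif.2.1] at h2; exact h2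
  · exact c1 r' c'

theorem refines_antisym (a b : List (List String)) (h1 : Refines a b) (h2 : Refines b a) :
    a = b := by
  obtain ⟨l1, rl1, c1⟩ := h1
  obtain ⟨l2, rl2, c2⟩ := h2
  have hcell : ∀ r c, pvCell a r c = pvCell b r c := by
    intro r c
    rcases c1 r c with h | h
    · exact h.symm
    · rcases c2 r c with h' | h'
      · exact h'
      · rw [h, h']
  refine List.ext_getElem l1 (fun i hi1 hi2 => ?_)
  have hrl : a[i].length = b[i].length := by
    rw [← getD_lt a [] i hi1, ← getD_lt b [] i hi2]
    exact rl1 i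
  refine List.ext_getElem hrl (fun j hj1 hj2 => ?_)
  have hca : pvCell a i j = a[i][j] := by
    unfold pvCell
    rw [getD_lt a [] i hi1, getD_lt _ _ j hj1]
  have hcb : pvCell b i j = b[i][j] := by
    unfold pvCell
    rw [getD_lt b [] i hi2, getD_lt _ _ j hj2]
  rw [← hca, ← hcb, hcell i j]

theorem refines_cell_imp (g h : List (List String)) (hr : Refines g h) (r c : Nat)
    (hc : pvCell h r c ≠ "#") : pvCell h r c = pvCell g r c := by
  rcases hr.2.2 r c with h' | h'
  · exact h'
  · exact absurd h' hc

-- ---------- survival ----------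
theorem survival (g f : List (List String)) (rows cols r c : Nat) (href : Refines g f)
    (hfix : Fixp rows cols f) (hb : blankable g rows cols r c) : pvCell f r c = "#" := by
  by_contra hne
  obtain ⟨hr, hc, hg, hwr, hwc⟩ := hb
  have himpR : ∀ i, mRow f r i = true → mRow g r i = true := by
    intro i hi
    simp only [mRow, decide_eq_true_eq] at hi ⊢
    rw [refines_cell_imp g f href r i hi] at hi; exact hi
  have himpC : ∀ i, mCol f c i = true → mCol g c i = true := by
    intro i hi
    simp only [mCol, decide_eq_true_eq] at hi ⊢
    rw [refines_cell_imp g f href i c hi] at hi; exact hi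
  have hfr : ¬ blankable f rows cols r c := hfix r c
  rcases Nat.lt_or_ge (wl (mRow f r) cols c) 3 with h3 | h3
  · rcases Nat.lt_or_ge (wl (mCol f c) rows r) 3 with h4 | h4
    · exact hfr ⟨hr, hc, hne, h3, h4⟩
    · have h5 := wl_mono (mCol g c) (mCol f c) rows r himpC (by simpa [mCol]) hr
      omega
  · have h5 := wl_mono (mRow g r) (mRow f r) cols c himpR (by simpa [mRow]) hc
    omega

-- ---------- nh ----------
theorem pairs_mem (rows cols r c : Nat) : (r, c) ∈ pairs rows cols ↔ r < rows ∧ c < cols := by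
  simp [pairs]

theorem pairs_len (rows cols : Nat) : (pairs rows cols).length = rows * cols := by
  simp [pairs, List.length_flatMap]

theorem nh_le (g : List (List String)) (rows cols : Nat) : nh g rows cols ≤ rows * cols := by
  calc nh g rows cols ≤ (pairs rows cols).length := List.countP_le_length
  _ = rows * cols := pairs_len rows cols

theorem countP_lt {α : Type} (l : List α) (p q : α → Bool) (h : ∀ x ∈ l, p x = true → q x = true)
    (a : α) (ha : a ∈ l) (hq : q a = true) (hp : ¬ p a = true) : l.countP p < l.countP q := by
  induction l with
  | nil => simp at ha
  | cons x xs ih =>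
    rw [List.countP_cons, List.countP_cons]
    rcases List.mem_cons.mp ha with h1 | h1
    · subst h1
      have hmono := List.countP_mono_left (l := xs) (p := p) (q := q)
        (fun y hy => h y (List.mem_cons_of_mem _ hy))
      simp [hp, hq]; omega
    · have := ih (fun y hy => h y (List.mem_cons_of_mem _ hy)) h1
      have hx : p x = true → q x = true := h x List.mem_cons_self
      by_cases hpx : p x = true
      · simp [hpx, hx hpx]; omega
      · simp [hpx]; split <;> omega

theorem mask_set_imp (g : List (List String)) (r c r' c' : Nat)
    (h : pvCell (pvSet g r c "#") r' c' ≠ "#") : pvCell g r' c' ≠ "#" := by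
  rw [pvCell_pvSet] at h
  split at h
  · exact absurd rfl h
  · exact h

theorem nh_set_le (g : List (List String)) (r c rows cols : Nat) :
    nh (pvSet g r c "#") rows cols ≤ nh g rows cols := by
  apply List.countP_mono_left
  intro rc _ hp
  simp only [mRow, decide_eq_true_eq] at hp ⊢
  exact mask_set_imp g r c rc.1 rc.2 hp

theorem nh_set_lt (g : List (List String)) (r c rows cols : Nat) (hr : r < rows) (hc : c < cols)
    (hne : pvCell g r c ≠ "#") : nh (pvSet g r c "#") rows cols < nh g rows cols := by
  have hin := cell_ne_lt g r c hne
  refine countP_lt _ _ _ (fun rc _ hp => ?_) (r, c)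
    ((pairs_mem rows cols r c).mpr ⟨hr, hc⟩) ?_ ?_
  · simp only [mRow, decide_eq_true_eq] at hp ⊢
    exact mask_set_imp g r c rc.1 rc.2 hp
  · simp [mRow, hne]
  · simp only [mRow, decide_eq_true_eq, not_not]
    rw [pvCell_pvSet, if_pos ⟨rfl, rfl, hin.1, hin.2⟩]

-- ---------- bridge A ----------
theorem startLeft_eq (g : List (List String)) (r : Nat) : ∀ c, startLeft g r c = startLm (mRow g r) c := by
  intro c; induction c with
  | zero => rfl
  | succ c ih =>
    simp only [startLeft, startLm, mRow]
    by_cases h : pvCell g r c ≠ "#" <;> simp [h, ih]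

theorem startUp_eq (g : List (List String)) (c : Nat) : ∀ r, startUp g c r = startLm (mCol g c) r := by
  intro r; induction r with
  | zero => rfl
  | succ r ih =>
    simp only [startUp, startLm, mCol]
    by_cases h : pvCell g r c ≠ "#" <;> simp [h, ih]

theorem runRight_eq (g : List (List String)) (rows cols r : Nat) (hr : r < rows) (s : Nat) :
    runRight g rows cols r s = runm (mRow g r) cols s := by
  rw [runRight, runm]
  by_cases h : s < cols ∧ pvCell g r s ≠ "#"
  · rw [dif_pos ⟨hr, h.1, h.2⟩, dif_pos ⟨h.1, by simp [mRow, h.2]⟩,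
      runRight_eq g rows cols r hr (s + 1)]
  · rw [dif_neg (by tauto), dif_neg (by simp only [mRow, decide_eq_true_eq]; tauto)]
termination_by cols - s
decreasing_by omega

theorem runDownA_eq (g : List (List String)) (rows cols c : Nat) (hc : c < cols) (s : Nat) :
    runDownA g rows cols s c = runm (mCol g c) rows s := by
  rw [runDownA, runm]
  by_cases h : s < rows ∧ pvCell g s c ≠ "#"
  · rw [dif_pos ⟨h.1, hc, h.2⟩, dif_pos ⟨h.1, by simp [mCol, h.2]⟩,
      runDownA_eq g rows cols c hc (s + 1)]
  · rw [dif_neg (by tauto), dif_neg (by simp only [mCol, decide_eq_true_eq]; tauto)]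
termination_by rows - s
decreasing_by omega

theorem cwl_eq (g : List (List String)) (rows cols r c : Nat) (hr : r < rows) (hc : c < cols) :
    cellWordLengths g rows cols r c = (wl (mRow g r) cols c, wl (mCol g c) rows r) := by
  unfold cellWordLengths wl
  rw [startLeft_eq, startUp_eq, runRight_eq g rows cols r hr, runDownA_eq g rows cols c hc]

-- ---------- bridge B ----------
def extMask (run : Nat) (cells : List String) : Nat → Bool :=
  fun i => if i < run then true else decide (cells.getD (i - run) "#" ≠ "#")

theorem getD_replicate {α : Type} (k : Nat) (x d : α) (j : Nat) (h : j < k) :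
    (List.replicate k x).getD j d = x := by
  rw [List.getD_eq_getElem?_getD, List.getElem?_replicate, if_pos h]; rfl

theorem startLm_shift (m m0 : Nat → Bool) (d : Nat) (hd : 0 < d) (hdf : m (d - 1) = false)
    (hagree : ∀ i, m (d + i) = m0 i) : ∀ k, startLm m (d + k) = d + startLm m0 k := by
  intro k; induction k with
  | zero =>
    obtain ⟨e, rfl⟩ : ∃ e, d = e + 1 := ⟨d - 1, by omega⟩
    show startLm m (e + 1) = e + 1 + startLm m0 0
    simp only [startLm]
    rw [if_neg (by simpa using hdf)]
  | succ k ih =>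
    have he : d + (k + 1) = (d + k) + 1 := by omega
    rw [he]
    show (if m (d + k) then startLm m (d + k) else d + k + 1) = d + startLm m0 (k + 1)
    rw [hagree k]
    show _ = d + (if m0 k then startLm m0 k else k + 1)
    by_cases h : m0 k = true
    · rw [if_pos h, if_pos h, ih]
    · rw [if_neg h, if_neg h]; omega

theorem runm_shift (m m0 : Nat → Bool) (d n0 : Nat) (hagree : ∀ i, m (d + i) = m0 i) :
    ∀ s, runm m (d + n0) (d + s) = runm m0 n0 s := by
  intro s
  fun_induction runm m0 n0 s with
  | case1 s h ih =>
    conv_lhs => rw [runm]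
    rw [dif_pos ⟨by omega, by rw [hagree s]; exact h.2⟩]
    have he : d + s + 1 = d + (s + 1) := by omega
    rw [he, ih]
  | case2 s h =>
    conv_lhs => rw [runm]
    rw [dif_neg]
    rintro ⟨hlt, hm⟩
    rw [hagree s] at hm
    exact h ⟨by omega, hm⟩

theorem rowLengthsAux_getD : ∀ (cells : List String) (run j : Nat), j < run + cells.length →
    (rowLengthsAux run cells).getD j 0 =
      if extMask run cells j then wl (extMask run cells) (run + cells.length) j else 0 := by
  intro cells
  induction cells with
  | nil =>
    intro run j hj
    simp only [List.length_nil, Nat.add_zero] at hj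
    have hm : ∀ i, i < run → extMask run [] i = true := by
      intro i hi; simp [extMask, hi]
    have hwl : wl (extMask run []) (run + ([] : List String).length) j = run := by
      unfold wl
      rw [startLm_allTrue _ j (fun i hi => hm i (by omega))]
      exact runm_eqk _ _ run 0 (fun i _ hi2 => hm i (by omega))
        (Or.inr (by simp)) (by simp)
    rw [show rowLengthsAux run [] = List.replicate run run from rfl,
      getD_replicate run run 0 j hj, if_pos (hm j hj), hwl]
  | cons x xs ih =>
    intro run j hj
    by_cases hx : x = "#"
    · subst hx
      have hmlt : ∀ i, i < run → extMask run ("#" :: xs) i = true := by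
        intro i hi; simp [extMask, hi]
      have hmrun : extMask run ("#" :: xs) run = false := by
        simp [extMask]
      have hmshift : ∀ i, extMask run ("#" :: xs) (run + 1 + i) = extMask 0 xs i := by
        intro i
        have he : run + 1 + i - run = i + 1 := by omega
        simp only [extMask, if_neg (by omega : ¬ run + 1 + i < run), he,
          List.getD_cons_succ, Nat.not_lt_zero, if_false, Nat.sub_zero]
      have hlhs : rowLengthsAux run ("#" :: xs) =
          List.replicate run run ++ 0 :: rowLengthsAux 0 xs := by
        simp [rowLengthsAux]
      rcases lt_trichotomy j run with hjr | hjr | hjr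
      · rw [hlhs, List.getD_append _ _ _ _ (by simpa using hjr),
          getD_replicate run run 0 j hjr, if_pos (hmlt j hjr)]
        unfold wl
        rw [startLm_allTrue _ j (fun i hi => hmlt i (by omega))]
        have := runm_eqk (extMask run ("#" :: xs)) (run + ("#" :: xs).length) run 0
          (fun i _ hi2 => hmlt i (by omega))
          (Or.inl (by simpa using hmrun)) (by omega)
        omega
      · subst hjr
        rw [hlhs, List.getD_append_right _ _ _ _ (by simp), if_neg (by simp [hmrun])]
        simp
      · have hk : j = run + 1 + (j - run - 1) := by omega
        have hklt : j - run - 1 < xs.length := by simp at hj; omega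
        rw [hlhs, List.getD_append_right _ _ _ _ (by simp; omega)]
        have he : j - (List.replicate run run).length = (j - run - 1) + 1 := by simp; omega
        rw [he, List.getD_cons_succ, ih 0 (j - run - 1) (by omega)]
        have hmj : extMask run ("#" :: xs) j = extMask 0 xs (j - run - 1) := by
          conv_lhs => rw [hk]
          exact hmshift (j - run - 1)
        rw [hmj]
        by_cases hmv : extMask 0 xs (j - run - 1) = true
        · rw [if_pos hmv, if_pos hmv]
          unfold wl
          have hsh := startLm_shift (extMask run ("#" :: xs)) (extMask 0 xs) (run + 1)
            (by omega) (by simpa using hmrun) hmshift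
          have hn : run + ("#" :: xs).length = (run + 1) + xs.length := by simp; omega
          rw [hn]
          conv_rhs => rw [hk, hsh (j - run - 1)]
          rw [runm_shift (extMask run ("#" :: xs)) (extMask 0 xs) (run + 1) xs.length
            hmshift (startLm (extMask 0 xs) (j - run - 1))]
          simp
        · rw [if_neg hmv, if_neg hmv]
    · have hmask : extMask (run + 1) xs = extMask run (x :: xs) := by
        funext i
        simp only [extMask]
        rcases lt_trichotomy i run with h | h | h
        · rw [if_pos (by omega), if_pos h]
        · subst h
          rw [if_pos (by omega), if_neg (by omega)]
          simp [hx]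
        · have he : i - run = (i - (run + 1)) + 1 := by omega
          rw [if_neg (by omega), if_neg (by omega), he, List.getD_cons_succ]
      have hlhs : rowLengthsAux run (x :: xs) = rowLengthsAux (run + 1) xs := by
        simp [rowLengthsAux, hx]
      have hn : run + (x :: xs).length = (run + 1) + xs.length := by simp; omega
      rw [hlhs, ih (run + 1) j (by simp at hj; omega), hmask, hn]

theorem rowLengths_getD (cells : List String) (j : Nat) (hj : j < cells.length) :
    (rowLengths cells).getD j 0 =
      if extMask 0 cells j then wl (extMask 0 cells) cells.length j else 0 := by
  have := rowLengthsAux_getD cells 0 j (by omega)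
  simpa [rowLengths] using this

theorem getD_map_range {α : Type} (n : Nat) (f : Nat → α) (i : Nat) (d : α) (h : i < n) :
    ((List.range n).map f).getD i d = f i := by
  rw [List.getD_eq_getElem?_getD, List.getElem?_map, List.getElem?_range h]
  rfl

theorem rowListB_mask (g : List (List String)) (cols r i : Nat) (hi : i < cols) :
    extMask 0 (rowListB g cols r) i = mRow g r i := by
  have h1 : (rowListB g cols r).getD i "#" = pvCell g r i := by
    unfold rowListB; exact getD_map_range cols _ i _ hi
  simp only [extMask, Nat.not_lt_zero, if_false, Nat.sub_zero, mRow, h1]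

theorem colListB_mask (g : List (List String)) (rows c i : Nat) (hi : i < rows) :
    extMask 0 (colListB g rows c) i = mCol g c i := by
  have h1 : (colListB g rows c).getD i "#" = pvCell g i c := by
    unfold colListB; exact getD_map_range rows _ i _ hi
  simp only [extMask, Nat.not_lt_zero, if_false, Nat.sub_zero, mCol, h1]

theorem rowListB_len (g : List (List String)) (cols r : Nat) :
    (rowListB g cols r).length = cols := by simp [rowListB]

theorem colListB_len (g : List (List String)) (rows c : Nat) :
    (colListB g rows c).length = rows := by simp [colListB]

theorem across_val (g : List (List String)) (rows cols r c : Nat) (hr : r < rows)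
    (hc : c < cols) (hne : pvCell g r c ≠ "#") :
    ((((List.range rows).map (fun r => rowLengths (rowListB g cols r))).getD r []).getD c 0)
      = wl (mRow g r) cols c := by
  rw [getD_map_range rows _ r _ hr,
    rowLengths_getD _ c (by rw [rowListB_len]; exact hc), rowListB_len,
    if_pos (by rw [rowListB_mask g cols r c hc]; simp [mRow, hne])]
  exact wl_congr _ _ cols c hc (fun i hi => rowListB_mask g cols r i hi)

theorem down_val (g : List (List String)) (rows cols r c : Nat) (hr : r < rows)
    (hc : c < cols) (hne : pvCell g r c ≠ "#") :
    ((((List.range cols).map (fun c => rowLengths (colListB g rows c))).getD c []).getD r 0)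
      = wl (mCol g c) rows r := by
  rw [getD_map_range cols _ c _ hc,
    rowLengths_getD _ r (by rw [colListB_len]; exact hr), colListB_len,
    if_pos (by rw [colListB_mask g rows c r hr]; simp [mCol, hne])]
  exact wl_congr _ _ rows r hr (fun i hi => colListB_mask g rows c i hi)

theorem passB_mem (g : List (List String)) (rows cols r c : Nat) :
    (r, c) ∈ passB g rows cols ↔ blankable g rows cols r c := by
  simp only [passB, List.mem_flatMap, List.mem_map, List.mem_filter, List.mem_range,
    Prod.mk.injEq, decide_eq_true_eq]
  constructor
  · rintro ⟨r', hr', c', ⟨hc', hcond⟩, rfl, rfl⟩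
    obtain ⟨hne, ha, hd⟩ := hcond
    refine ⟨hr', hc', hne, ?_, ?_⟩
    · rw [← across_val g rows cols r' c' hr' hc' hne]; exact ha
    · rw [← down_val g rows cols r' c' hr' hc' hne]; exact hd
  · rintro ⟨hr, hc, hne, hwa, hwd⟩
    refine ⟨r, hr, c, ⟨hc, hne, ?_, ?_⟩, rfl, rfl⟩
    · rw [across_val g rows cols r c hr hc hne]; exact hwa
    · rw [down_val g rows cols r c hr hc hne]; exact hwd

-- ---------- generic foldl lemmas ----------
theorem foldl_inv {α β : Type} (f : α → β → α) (l : List β) (P : α → Prop)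
    (h : ∀ st x, x ∈ l → P st → P (f st x)) (init : α) (h0 : P init) : P (l.foldl f init) := by
  induction l generalizing init with
  | nil => exact h0
  | cons x xs ih =>
    exact ih (fun st y hy => h st y (List.mem_cons_of_mem _ hy)) _
      (h init x List.mem_cons_self h0)

theorem foldl_flag_id {α β : Type} (f : α × Bool → β → α × Bool) (l : List β)
    (H : ∀ st x, (f st x).2 = false → f st x = st) (init : α × Bool)
    (hfin : (l.foldl f init).2 = false) : l.foldl f init = init ∧ ∀ x ∈ l, f init x = init := by
  induction l generalizing init with
  | nil => exact ⟨rfl, by simp⟩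
  | cons x xs ih =>
    simp only [List.foldl_cons] at hfin ⊢
    obtain ⟨h1, h2⟩ := ih (f init x) hfin
    have h3 : (f init x).2 = false := by rw [h1] at hfin; exact hfin
    have h4 : f init x = init := H init x h3
    rw [h4] at h2
    exact ⟨h1.trans h4, fun y hy => by
      rcases List.mem_cons.mp hy with h | h
      · subst h; exact h4
      · exact h2 y h⟩

-- ---------- pass A via pairs ----------
def stepA (rows cols : Nat) (st : List (List String) × Bool) (rc : Nat × Nat) :
    List (List String) × Bool :=
  if pvCell st.1 rc.1 rc.2 = "#" then st
  else if (cellWordLengths st.1 rows cols rc.1 rc.2).1 < 3 ∧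
      (cellWordLengths st.1 rows cols rc.1 rc.2).2 < 3 then
    (pvSet st.1 rc.1 rc.2 "#", true)
  else st

theorem passA_eq (g : List (List String)) (rows cols : Nat) :
    passA g rows cols = (pairs rows cols).foldl (stepA rows cols) (g, false) := by
  unfold passA pairs
  rw [List.foldl_flatMap]
  simp only [List.foldl_map]
  rfl

theorem stepA_flag (rows cols : Nat) (st : List (List String) × Bool) (rc : Nat × Nat)
    (h : (stepA rows cols st rc).2 = false) : stepA rows cols st rc = st := by
  revert h
  unfold stepA
  split
  · intro _; rfl
  · split
    · intro h; simp at h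
    · intro _; rfl

theorem stepA_blankable (rows cols : Nat) (st : List (List String) × Bool) (r c : Nat)
    (hr : r < rows) (hc : c < cols) (hne : pvCell st.1 r c ≠ "#")
    (hlt : (cellWordLengths st.1 rows cols r c).1 < 3 ∧ (cellWordLengths st.1 rows cols r c).2 < 3) :
    blankable st.1 rows cols r c := by
  rw [cwl_eq st.1 rows cols r c hr hc] at hlt
  exact ⟨hr, hc, hne, hlt.1, hlt.2⟩

-- ---------- pass A consequences ----------
theorem passA_refines (g : List (List String)) (rows cols : Nat) :
    Refines g (passA g rows cols).1 := by
  rw [passA_eq]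
  refine foldl_inv (stepA rows cols) (pairs rows cols)
    (fun st => Refines g st.1) ?_ (g, false) (refines_refl g)
  intro st rc _ hst
  unfold stepA
  split
  · exact hst
  · split
    · exact refines_trans _ _ _ hst (refines_set st.1 rc.1 rc.2)
    · exact hst

theorem passA_to_f (g f : List (List String)) (rows cols : Nat) (hfix : Fixp rows cols f)
    (href : Refines g f) : Refines (passA g rows cols).1 f := by
  rw [passA_eq]
  refine foldl_inv (stepA rows cols) (pairs rows cols)
    (fun st => Refines st.1 f) ?_ (g, false) href
  intro st rc hmem hst
  unfold stepA
  split
  · exact hst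
  · split
    · rename_i hne hlt
      obtain ⟨hr, hc⟩ := (pairs_mem rows cols rc.1 rc.2).mp hmem
      exact refines_set_to st.1 f rc.1 rc.2 hst
        (survival st.1 f rows cols rc.1 rc.2 hst hfix
          (stepA_blankable rows cols st rc.1 rc.2 hr hc hne hlt))
    · exact hst

theorem passA_false (g : List (List String)) (rows cols : Nat)
    (h : (passA g rows cols).2 = false) :
    (passA g rows cols).1 = g ∧ Fixp rows cols g := by
  rw [passA_eq] at h ⊢
  obtain ⟨h1, h2⟩ := foldl_flag_id _ _ (stepA_flag rows cols) (g, false) h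
  constructor
  · rw [h1]
  · intro r c hb
    obtain ⟨hr, hc, hne, hw1, hw2⟩ := hb
    have hmem := (pairs_mem rows cols r c).mpr ⟨hr, hc⟩
    have := h2 (r, c) hmem
    unfold stepA at this
    rw [if_neg (by simpa using hne)] at this
    rw [cwl_eq g rows cols r c hr hc] at this
    rw [if_pos ⟨hw1, hw2⟩] at this
    exact absurd (congrArg Prod.snd this) (by simp)

theorem passA_true (g : List (List String)) (rows cols : Nat)
    (h : (passA g rows cols).2 = true) :
    nh (passA g rows cols).1 rows cols < nh g rows cols := by
  rw [passA_eq] at h ⊢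
  have := foldl_inv (stepA rows cols) (pairs rows cols)
    (fun st => nh st.1 rows cols ≤ nh g rows cols ∧
      (st.2 = true → nh st.1 rows cols < nh g rows cols))
    ?_ (g, false) ⟨le_rfl, by simp⟩
  · exact this.2 h
  · intro st rc hmem hst
    unfold stepA
    split
    · exact hst
    · split
      · rename_i hne _
        obtain ⟨hr, hc⟩ := (pairs_mem rows cols rc.1 rc.2).mp hmem
        have := nh_set_lt st.1 rc.1 rc.2 rows cols hr hc hne
        exact ⟨by simp; omega, fun _ => by simp; omega⟩
      · exact hst

-- ---------- loop A ----------
theorem colsOf_getD (g : List (List String)) : colsOf g = (g.getD 0 []).length := by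
  cases g <;> rfl

theorem loopA_refines : ∀ (fuel : Nat) (g : List (List String)), Refines g (loopA fuel g) := by
  intro fuel
  induction fuel with
  | zero => intro g; exact refines_refl g
  | succ fuel ih =>
    intro g
    simp only [loopA]
    split
    · exact refines_trans _ _ _ (passA_refines g g.length (colsOf g)) (ih _)
    · exact passA_refines g g.length (colsOf g)

theorem loopA_to_f : ∀ (fuel : Nat) (g f : List (List String)) (rows cols : Nat),
    rows = g.length → cols = colsOf g → Fixp rows cols f → Refines g f →
    Refines (loopA fuel g) f := by
  intro fuel
  induction fuel with
  | zero => intro g f rows cols _ _ _ href; exact href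
  | succ fuel ih =>
    intro g f rows cols hrows hcols hfix href
    simp only [loopA]
    have hp := passA_to_f g f g.length (colsOf g) (hrows ▸ hcols ▸ hfix) href
    have hsh := passA_refines g g.length (colsOf g)
    have hc2 : cols = colsOf (passA g g.length (colsOf g)).1 := by
      rw [hcols]
      exact ((colsOf_getD g).trans (hsh.2.1 0)).trans (colsOf_getD _).symm
    split
    · refine ih _ f rows cols (hrows.trans hsh.1) hc2 hfix hp
    · exact hp

theorem loopA_fix : ∀ (fuel : Nat) (g : List (List String)) (rows cols : Nat),
    rows = g.length → cols = colsOf g → nh g rows cols < fuel →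
    Fixp rows cols (loopA fuel g) := by
  intro fuel
  induction fuel with
  | zero => intro g rows cols _ _ h; omega
  | succ fuel ih =>
    intro g rows cols hrows hcols hfuel
    simp only [loopA]
    split
    · rename_i hflag
      have hlt := passA_true g g.length (colsOf g) hflag
      have hsh := passA_refines g g.length (colsOf g)
      have hc2 : cols = colsOf (passA g g.length (colsOf g)).1 := by
        rw [hcols]
        exact ((colsOf_getD g).trans (hsh.2.1 0)).trans (colsOf_getD _).symm
      refine ih _ rows cols (hrows.trans hsh.1) hc2 ?_
      subst hrows; subst hcols
      omega
    · rename_i hflag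
      have := passA_false g g.length (colsOf g) (by simpa using hflag)
      rw [this.1]
      exact hrows ▸ hcols ▸ this.2

-- ---------- pass / loop B ----------
theorem applyB_refines (g : List (List String)) (l : List (Nat × Nat)) :
    Refines g (l.foldl (fun h rc => pvSet h rc.1 rc.2 "#") g) := by
  refine foldl_inv _ l (fun h => Refines g h) ?_ g (refines_refl g)
  intro st rc _ hst
  exact refines_trans _ _ _ hst (refines_set st rc.1 rc.2)

theorem applyB_to_f (g f : List (List String)) (rows cols : Nat) (hfix : Fixp rows cols f)
    (href : Refines g f) :
    Refines ((passB g rows cols).foldl (fun h rc => pvSet h rc.1 rc.2 "#") g) f := by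
  refine foldl_inv _ (passB g rows cols) (fun h => Refines h f) ?_ g href
  intro st rc hmem hst
  have hb : blankable g rows cols rc.1 rc.2 := (passB_mem g rows cols rc.1 rc.2).mp hmem
  exact refines_set_to st f rc.1 rc.2 hst (survival g f rows cols rc.1 rc.2 href hfix hb)

theorem applyB_nh_le (g : List (List String)) (rows cols : Nat) (l : List (Nat × Nat)) :
    nh (l.foldl (fun h rc => pvSet h rc.1 rc.2 "#") g) rows cols ≤ nh g rows cols := by
  induction l generalizing g with
  | nil => exact le_rfl
  | cons rc l ih =>
    simp only [List.foldl_cons]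
    exact (ih _).trans (nh_set_le g rc.1 rc.2 rows cols)

theorem passB_empty_fix (g : List (List String)) (rows cols : Nat)
    (h : passB g rows cols = []) : Fixp rows cols g := by
  intro r c hb
  have := (passB_mem g rows cols r c).mpr hb
  rw [h] at this
  simp at this

theorem passB_nonempty_nh (g : List (List String)) (rows cols : Nat)
    (h : passB g rows cols ≠ []) :
    nh ((passB g rows cols).foldl (fun h rc => pvSet h rc.1 rc.2 "#") g) rows cols <
      nh g rows cols := by
  rcases hl : passB g rows cols with _ | ⟨rc, rest⟩
  · exact absurd hl h
  · have hmem : rc ∈ passB g rows cols := by rw [hl]; exact List.mem_cons_self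
    have hb := (passB_mem g rows cols rc.1 rc.2).mp (by simpa using hmem)
    have h1 := nh_set_lt g rc.1 rc.2 rows cols hb.1 hb.2.1 hb.2.2.1
    simp only [List.foldl_cons]
    exact lt_of_le_of_lt (applyB_nh_le _ rows cols rest) h1

theorem loopB_refines : ∀ (fuel : Nat) (g : List (List String)) (rows cols : Nat),
    Refines g (loopB fuel g rows cols) := by
  intro fuel
  induction fuel with
  | zero => intro g rows cols; exact refines_refl g
  | succ fuel ih =>
    intro g rows cols
    simp only [loopB]
    split
    · exact refines_refl g
    · exact refines_trans _ _ _ (applyB_refines g _) (ih _ rows cols)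

theorem loopB_to_f : ∀ (fuel : Nat) (g f : List (List String)) (rows cols : Nat),
    Fixp rows cols f → Refines g f → Refines (loopB fuel g rows cols) f := by
  intro fuel
  induction fuel with
  | zero => intro g f rows cols _ href; exact href
  | succ fuel ih =>
    intro g f rows cols hfix href
    simp only [loopB]
    split
    · exact href
    · exact ih _ f rows cols hfix (applyB_to_f g f rows cols hfix href)

theorem loopB_fix : ∀ (fuel : Nat) (g : List (List String)) (rows cols : Nat),
    nh g rows cols < fuel → Fixp rows cols (loopB fuel g rows cols) := by
  intro fuel
  induction fuel with
  | zero => intro g rows cols h; omega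
  | succ fuel ih =>
    intro g rows cols hfuel
    simp only [loopB]
    split
    · rename_i hempty
      exact passB_empty_fix g rows cols hempty
    · rename_i hne
      exact ih _ rows cols (by have := passB_nonempty_nh g rows cols hne; omega)

-- ===== VERDICT (by name: the statement is the Claim_ definition above) =====
theorem sanitize_grid_spec : Claim_equal_sanitize_grid := by
  intro grid _ _
  unfold Spec_sanitize_grid sanitize_grid sanitize_grid_alt
  have hnh : nh grid grid.length (colsOf grid) < grid.length * colsOf grid + 1 := by
    have := nh_le grid grid.length (colsOf grid)
    omega
  have hAfix : Fixp grid.length (colsOf grid) (loopA (grid.length * colsOf grid + 1) grid) :=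
    loopA_fix _ grid _ _ rfl rfl hnh
  have hBfix : Fixp grid.length (colsOf grid)
      (loopB (grid.length * colsOf grid + 1) grid grid.length (colsOf grid)) :=
    loopB_fix _ grid _ _ hnh
  have hAref := loopA_refines (grid.length * colsOf grid + 1) grid
  have hBref := loopB_refines (grid.length * colsOf grid + 1) grid grid.length (colsOf grid)
  have h1 : Refines (loopA (grid.length * colsOf grid + 1) grid)
      (loopB (grid.length * colsOf grid + 1) grid grid.length (colsOf grid)) :=
    loopA_to_f _ grid _ _ _ rfl rfl hBfix hBref
  have h2 : Refines (loopB (grid.length * colsOf grid + 1) grid grid.length (colsOf grid))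
      (loopA (grid.length * colsOf grid + 1) grid) :=
    loopB_to_f _ grid _ _ _ hAfix hAref
  exact refines_antisym _ _ h1 h2
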